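-- pv_equiv track=rewrite | github.com/kaviyavarshini08/CSA5132-Cryptography-and-Network-description- | 17.DES DECRYPTION KEY.py | generate_decryption_keys
-- ===== SOURCE A (Python) =====
-- SHIFT_SCHEDULE = [1, 1, 2, 2, 2, 2, 2, 2, 1, 2, 2, 2, 2, 2, 2, 1]
--
-- def left_shift(bits, n):
--     return bits[n:] + bits[:n]
--
-- def generate_decryption_keys(main_key_bits):
--     # 1. Initial Permutation (PC-1) would happen here
--     # Splitting 56-bit key into two 28-bit halves (C and D)
--     C, D = main_key_bits[:28], main_key_bits[28:]
--     subkeys = []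
--
--     # 2. Generate all 16 subkeys
--     for shift in SHIFT_SCHEDULE:
--         C = left_shift(C, shift)
--         D = left_shift(D, shift)
--         # In reality, PC-2 permutation is applied here to get 48-bit K
--         subkeys.append(C + D)
--
--     # 3. For DECRYPTION, reverse the subkey list
--     decryption_keys = subkeys[::-1]
--     return decryption_keys
-- ===== SOURCE B (Python) =====
-- SHIFT_SCHEDULE = [1, 1, 2, 2, 2, 2, 2, 2, 1, 2, 2, 2, 2, 2, 2, 1]
--
-- def _rot(bits, n):
--     if not bits:
--         return bits
--     k = n % len(bits)
--     return bits[k:] + bits[:k]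
--
-- def generate_decryption_keys(main_key_bits):
--     C0, D0 = main_key_bits[:28], main_key_bits[28:]
--     # cumulative shift offsets: 1, 2, 4, ..., 28
--     offsets = []
--     total = 0
--     for s in SHIFT_SCHEDULE:
--         total += s
--         offsets.append(total)
--     # build the reversed subkey list directly from the largest offset down
--     return [_rot(C0, off) + _rot(D0, off) for off in reversed(offsets)]
-- ===== Notes on version B (the rewrite author's own statement) =====
-- stated objective: alternative
-- what changed: Replaces the stateful loop that repeatedly mutates C and D by slicing with a prefix-sum of the shift schedule and direct modular rotation of the original halves, building the reversed subkey list directly.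
import Mathlib
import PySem

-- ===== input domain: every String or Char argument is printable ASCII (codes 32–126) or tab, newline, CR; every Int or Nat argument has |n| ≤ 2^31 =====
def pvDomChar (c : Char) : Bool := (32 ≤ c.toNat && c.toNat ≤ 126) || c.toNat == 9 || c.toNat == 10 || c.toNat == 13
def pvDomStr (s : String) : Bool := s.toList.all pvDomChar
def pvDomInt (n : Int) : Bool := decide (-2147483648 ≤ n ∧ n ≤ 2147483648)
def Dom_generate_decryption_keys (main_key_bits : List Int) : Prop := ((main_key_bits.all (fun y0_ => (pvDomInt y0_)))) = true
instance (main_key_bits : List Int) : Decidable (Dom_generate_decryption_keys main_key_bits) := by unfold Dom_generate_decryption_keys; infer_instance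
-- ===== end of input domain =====

-- B replaces the stateful round-by-round mutation of C and D by prefix-sum offsets and
-- direct modular rotation of the original halves (alternative decomposition, same cost).

-- ===== PORT A =====
def SHIFT_SCHEDULE : List Int := [1, 1, 2, 2, 2, 2, 2, 2, 1, 2, 2, 2, 2, 2, 2, 1]

def left_shift (bits : List Int) (n : Int) : List Int :=
  PySem.List.slice bits (some n) none ++ PySem.List.slice bits none (some n)

def aLoop : List Int → List Int → List Int → List (List Int) → List (List Int)
  | [], _, _, subkeys => subkeys
  | s :: rest, C, D, subkeys =>
    aLoop rest (left_shift C s) (left_shift D s)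
      (subkeys ++ [left_shift C s ++ left_shift D s])

-- subkeys[::-1] is .reverse (PySem.List.slice?_none_none_neg_one)
def generate_decryption_keys (main_key_bits : List Int) : List (List Int) :=
  (aLoop SHIFT_SCHEDULE (PySem.List.slice main_key_bits none (some 28))
    (PySem.List.slice main_key_bits (some 28) none) []).reverse

-- ===== PORT B =====
def rotB (bits : List Int) (n : Int) : List Int :=
  if bits = [] then bits
  else
    PySem.List.slice bits (some (PySem.Int.mod n (bits.length : Int))) none ++
      PySem.List.slice bits none (some (PySem.Int.mod n (bits.length : Int)))

def prefixOffsets : List Int → Int → List Int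
  | [], _ => []
  | s :: rest, t => (t + s) :: prefixOffsets rest (t + s)

def generate_decryption_keys_alt (main_key_bits : List Int) : List (List Int) :=
  let C0 := PySem.List.slice main_key_bits none (some 28)
  let D0 := PySem.List.slice main_key_bits (some 28) none
  ((prefixOffsets SHIFT_SCHEDULE 0).reverse).map (fun off => rotB C0 off ++ rotB D0 off)

-- ===== PRECONDITION & SPEC =====
def Spec_generate_decryption_keys (main_key_bits : List Int) (out : List (List Int)) : Prop := out = generate_decryption_keys_alt main_key_bits
instance (main_key_bits : List Int) (out : List (List Int)) : Decidable (Spec_generate_decryption_keys main_key_bits out) := by unfold Spec_generate_decryption_keys; infer_instance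

-- ===== CLAIM (what is proved, stated in full; the proofs are below) =====
def Claim_equal_generate_decryption_keys : Prop := ∀ (main_key_bits : List Int), Dom_generate_decryption_keys main_key_bits → Spec_generate_decryption_keys main_key_bits (generate_decryption_keys main_key_bits)

-- ===== LEMMAS AND PROOFS =====

-- left_shift by 1 or 2 is rotation (Python slices clamp; a 2-shift of a ≤1-element list is the identity = its rotation)
theorem ls_eq_rotate (l : List Int) (s : Int) (hs : s = 1 ∨ s = 2) :
    left_shift l s = l.rotate s.toNat := by
  have hpos : (0:Int) ≤ s := by rcases hs with h | h <;> simp [h]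
  unfold left_shift
  rw [PySem.List.slice_from _ hpos, PySem.List.slice_to _ hpos]
  by_cases hlen : s.toNat ≤ l.length
  · rw [List.rotate_eq_drop_append_take hlen]
  · -- length < s.toNat ≤ 2: list has ≤ 1 element; both sides are l
    rcases hs with h1 | h1 <;> subst h1 <;>
      rcases l with _ | ⟨x, _ | ⟨y, t⟩⟩ <;>
      simp_all

theorem rotB_eq_rotate (l : List Int) (n : Int) (hn : 0 ≤ n) :
    rotB l n = l.rotate n.toNat := by
  unfold rotB
  by_cases h : l = []
  · simp [h]
  · have hlen : (0:Int) < l.length := by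
      simp [List.length_pos_iff]; exact h
    have hk0 : 0 ≤ PySem.Int.mod n l.length := PySem.Int.mod_nonneg n hlen
    have hklt : PySem.Int.mod n l.length < l.length := PySem.Int.mod_lt n hlen
    rw [if_neg h, PySem.List.slice_from _ hk0, PySem.List.slice_to _ hk0]
    have hmod : PySem.Int.mod n l.length = n % (l.length : Int) :=
      PySem.Int.mod_eq_emod_of_pos hlen
    have hnat : (PySem.Int.mod n (l.length : Int)).toNat = n.toNat % l.length := by
      rw [hmod]
      rcases Int.eq_ofNat_of_zero_le hn with ⟨m, rfl⟩
      rw [← Int.natCast_mod, Int.toNat_natCast, Int.toNat_natCast]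
    rw [hnat, ← List.rotate_mod,
      List.rotate_eq_drop_append_take (le_of_lt (Nat.mod_lt _ (by omega)))]

theorem loop_eq (sch : List Int) (C0 D0 : List Int) (a : Nat) (acc : List (List Int))
    (h : ∀ s ∈ sch, s = 1 ∨ s = 2) :
    aLoop sch (C0.rotate a) (D0.rotate a) acc
      = acc ++ (prefixOffsets sch (a : Int)).map (fun off => rotB C0 off ++ rotB D0 off) := by
  induction sch generalizing a acc with
  | nil => simp [aLoop, prefixOffsets]
  | cons s rest ih =>
    have hs : s = 1 ∨ s = 2 := h s (by simp)
    have hrest : ∀ t ∈ rest, t = 1 ∨ t = 2 := fun t ht => h t (by simp [ht])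
    have hC : left_shift (C0.rotate a) s = C0.rotate (a + s.toNat) := by
      rw [ls_eq_rotate _ _ hs, List.rotate_rotate]
    have hD : left_shift (D0.rotate a) s = D0.rotate (a + s.toNat) := by
      rw [ls_eq_rotate _ _ hs, List.rotate_rotate]
    have hcast : (a : Int) + s = ((a + s.toNat : Nat) : Int) := by
      rcases hs with h1 | h1 <;> subst h1 <;> push_cast <;> ring
    have hrB : rotB C0 ((a : Int) + s) = C0.rotate (a + s.toNat) := by
      rw [hcast, rotB_eq_rotate _ _ (by positivity), Int.toNat_natCast]
    have hrD : rotB D0 ((a : Int) + s) = D0.rotate (a + s.toNat) := by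
      rw [hcast, rotB_eq_rotate _ _ (by positivity), Int.toNat_natCast]
    show aLoop (s :: rest) (C0.rotate a) (D0.rotate a) acc = _
    rw [aLoop, hC, hD]
    rw [show prefixOffsets (s :: rest) (a : Int)
        = ((a : Int) + s) :: prefixOffsets rest ((a : Int) + s) from rfl]
    rw [List.map_cons, hrB, hrD, hcast, ih _ _ hrest]
    simp

-- ===== VERDICT (by name: the statement is the Claim_ definition above) =====
theorem generate_decryption_keys_spec : Claim_equal_generate_decryption_keys := by
  intro l _
  unfold Spec_generate_decryption_keys generate_decryption_keys generate_decryption_keys_alt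
  have hsch : ∀ s ∈ SHIFT_SCHEDULE, s = 1 ∨ s = 2 := by decide
  have h0 : ∀ (m : List Int), m = m.rotate 0 := fun m => (List.rotate_zero m).symm
  rw [h0 (PySem.List.slice l none (some 28)), h0 (PySem.List.slice l (some 28) none),
    loop_eq _ _ _ 0 [] hsch]
  simp [List.map_reverse]
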